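-- pv_equiv track=rewrite | github.com/OtotaO/SUM | test_streaming_api.py | create_massive_test_text
-- ===== SOURCE A (Python) =====
-- def create_massive_test_text(target_words=10000):
--     """Create a large test text for API testing."""
--
--     base_content = """
--     Artificial Intelligence represents one of the most significant technological
--     breakthroughs in human history. The field encompasses machine learning,
--     natural language processing, computer vision, robotics, and many other
--     specialized domains that collectively aim to create systems capable of
--     performing tasks that typically require human intelligence.
--
--     Machine learning, a subset of AI, has revolutionized how we approach
--     complex problems by enabling computers to learn patterns from data
--     without explicit programming for every scenario. Deep learning networks,
--     inspired by the structure of the human brain, can process vast amounts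
--     of information and identify intricate patterns that would be impossible
--     for humans to detect manually.
--
--     Natural language processing has enabled machines to understand, interpret,
--     and generate human language with increasing sophistication. Modern language
--     models can engage in meaningful conversations, write creative content,
--     translate between languages, and even help with complex reasoning tasks.
--
--     Computer vision systems can now analyze images and videos with superhuman
--     accuracy in many domains. From medical diagnosis to autonomous vehicles,
--     these systems are transforming industries and saving lives through their
--     ability to process visual information rapidly and accurately.
--
--     Robotics combines AI with mechanical engineering to create systems that
--     can interact with the physical world. From manufacturing automation to
--     space exploration, robots equipped with AI capabilities are extending
--     human reach and capabilities in unprecedented ways.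
--
--     The ethical implications of AI development cannot be ignored. As these
--     systems become more powerful and ubiquitous, questions of fairness,
--     transparency, privacy, and human agency become increasingly important.
--     The choices we make today about AI development will shape the future
--     of human civilization.
--
--     Looking ahead, the potential applications of AI seem limitless. Quantum
--     computing may revolutionize AI capabilities, enabling solutions to
--     problems that are currently intractable. Brain-computer interfaces
--     could create new forms of human-AI collaboration. The next decades
--     promise continued breakthroughs that will further transform our world.
--     """
--
--     # Repeat content to reach target word count
--     current_text = ""
--     current_words = 0
--     section_counter = 1
--
--     while current_words < target_words:
--         current_text += f"\n\nSection {section_counter}: Extended Analysis\n"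
--         current_text += base_content
--         current_text += f"\n\nThis section has explored key concepts in artificial intelligence and its applications. The rapid advancement in AI technologies continues to reshape industries, create new opportunities, and present novel challenges that require careful consideration and ethical frameworks. As we continue to push the boundaries of what machines can accomplish, the importance of responsible development and deployment becomes ever more critical.\n"
--
--         current_words = len(current_text.split())
--         section_counter += 1
--
--     return current_text
-- ===== SOURCE B (Python) =====
-- def create_massive_test_text(target_words=10000):
--     """Create a large test text for API testing (closed-form section count)."""
--
--     base_content = '\n    Artificial Intelligence represents one of the most significant technological \n    breakthroughs in human history. The field encompasses machine learning, \n    natural language processing, computer vision, robotics, and many other \n    specialized domains that collectively aim to create systems capable of \n    performing tasks that typically require human intelligence.\n    \n    Machine learning, a subset of AI, has revolutionized how we approach \n    complex problems by enabling computers to learn patterns from data \n    without explicit programming for every scenario. Deep learning networks, \n    inspired by the structure of the human brain, can process vast amounts \n    of information and identify intricate patterns that would be impossible \n    for humans to detect manually.\n    \n    Natural language processing has enabled machines to understand, interpret, \n    and generate human language with increasing sophistication. Modern language \n    models can engage in meaningful conversations, write creative content, \n    translate between languages, and even help with complex reasoning tasks.\n    \n    Computer vision systems can now analyze images and videos with superhuman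 \n    accuracy in many domains. From medical diagnosis to autonomous vehicles, \n    these systems are transforming industries and saving lives through their \n    ability to process visual information rapidly and accurately.\n    \n    Robotics combines AI with mechanical engineering to create systems that \n    can interact with the physical world. From manufacturing automation to \n    space exploration, robots equipped with AI capabilities are extending \n    human reach and capabilities in unprecedented ways.\n    \n    The ethical implications of AI development cannot be ignored. As these \n    systems become more powerful and ubiquitous, questions of fairness, \n    transparency, privacy, and human agency become increasingly important. \n    The choices we make today about AI development will shape the future \n    of human civilization.\n    \n    Looking ahead, the potential applications of AI seem limitless. Quantum \n    computing may revolutionize AI capabilities, enabling solutions to \n    problems that are currently intractable. Brain-computer interfaces \n    could create new forms of human-AI collaboration. The next decades \n    promise continued breakthroughs that will further transform our world.\n    '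
--
--     closing = '\n\nThis section has explored key concepts in artificial intelligence and its applications. The rapid advancement in AI technologies continues to reshape industries, create new opportunities, and present novel challenges that require careful consideration and ethical frameworks. As we continue to push the boundaries of what machines can accomplish, the importance of responsible development and deployment becomes ever more critical.\n'
--
--     def section(n):
--         return f"\n\nSection {n}: Extended Analysis\n" + base_content + closing
--
--     words_per_section = len(section(1).split())
--     sections_needed = -(-target_words // words_per_section)  # ceil(target/words_per_section)
--     return "".join(section(n) for n in range(1, sections_needed + 1))
-- ===== Notes on version B (the rewrite author's own statement) =====
-- stated objective: faster
-- what changed: A appends sections in a loop and re-splits the entire accumulated text after every pass to count words; B computes the constant per-section word count once, derives the number of sections as a ceiling division, and joins that many sections directly.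
import Mathlib
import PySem

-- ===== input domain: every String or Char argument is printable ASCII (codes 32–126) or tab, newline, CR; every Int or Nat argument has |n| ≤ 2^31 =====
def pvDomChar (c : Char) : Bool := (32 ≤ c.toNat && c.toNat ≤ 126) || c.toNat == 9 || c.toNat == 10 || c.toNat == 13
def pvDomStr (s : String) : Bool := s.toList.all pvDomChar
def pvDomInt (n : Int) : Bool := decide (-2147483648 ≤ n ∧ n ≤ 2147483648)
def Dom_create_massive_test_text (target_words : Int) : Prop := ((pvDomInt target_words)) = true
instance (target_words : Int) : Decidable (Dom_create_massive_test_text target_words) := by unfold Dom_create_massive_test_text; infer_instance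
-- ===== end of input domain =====

-- B replaces A's quadratic loop (re-splitting the whole text each pass) by a closed-form
-- section count: objective "faster" (each section contributes a constant word count).

-- ===== PORT A =====
-- String literals of the Python file, shared verbatim by both ports.
def pvHeadPre : String := "\n\nSection"
def pvMidRest : String := "Extended Analysis\n"
def pvBaseContent : String := "\n    Artificial Intelligence represents one of the most significant technological \n    breakthroughs in human history. The field encompasses machine learning, \n    natural language processing, computer vision, robotics, and many other \n    specialized domains that collectively aim to create systems capable of \n    performing tasks that typically require human intelligence.\n    \n    Machine learning, a subset of AI, has revolutionized how we approach \n    complex problems by enabling computers to learn patterns from data \n    without explicit programming for every scenario. Deep learning networks, \n    inspired by the structure of the human brain, can process vast amounts \n    of information and identify intricate patterns that would be impossible \n    for humans to detect manually.\n    \n    Natural language processing has enabled machines to understand, interpret, \n    and generate human language with increasing sophistication. Modern language \n    models can engage in meaningful conversations, write creative content, \n    translate between languages, and even help with complex reasoning tasks.\n    \n    Computer vision systems can now analyze images and videos with superhuman \n    accuracy in many domains. From medical diagnosis to autonomous vehicles, \n    these systems are transforming industries and saving lives through their \n    ability to process visual information rapidly and accurately.\n    \n    Robotics combines AI with mechanical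 engineering to create systems that \n    can interact with the physical world. From manufacturing automation to \n    space exploration, robots equipped with AI capabilities are extending \n    human reach and capabilities in unprecedented ways.\n    \n    The ethical implications of AI development cannot be ignored. As these \n    systems become more powerful and ubiquitous, questions of fairness, \n    transparency, privacy, and human agency become increasingly important. \n    The choices we make today about AI development will shape the future \n    of human civilization.\n    \n    Looking ahead, the potential applications of AI seem limitless. Quantum \n    computing may revolutionize AI capabilities, enabling solutions to \n    problems that are currently intractable. Brain-computer interfaces \n    could create new forms of human-AI collaboration. The next decades \n    promise continued breakthroughs that will further transform our world.\n    "
def pvClosing : String := "\n\nThis section has explored key concepts in artificial intelligence and its applications. The rapid advancement in AI technologies continues to reshape industries, create new opportunities, and present novel challenges that require careful consideration and ethical frameworks. As we continue to push the boundaries of what machines can accomplish, the importance of responsible development and deployment becomes ever more critical.\n"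

-- A's while-loop; `fuel` only makes the recursion total (target_words.toNat + 1 is proved
-- sufficient below), every step is A's: append header f-string, base content and closing,
-- then recount the words of the WHOLE text with split().
def pvLoopA (target : Int) : Nat → List Char → Int → Int → List Char
  | 0, text, _, _ => text
  | fuel + 1, text, words, counter =>
    if words < target then
      let text1 := text ++ (pvHeadPre.toList ++ ' ' :: (PySem.Int.toChars counter ++ ':' :: ' ' :: pvMidRest.toList))
      let text2 := text1 ++ pvBaseContent.toList
      let text3 := text2 ++ pvClosing.toList
      pvLoopA target fuel text3 ((PySem.Chars.split₀ text3).length : Int) (counter + 1)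
    else text

def create_massive_test_text (target_words : Int) : String :=
  String.ofList (pvLoopA target_words (target_words.toNat + 1) [] 0 1)

-- ===== PORT B =====
-- Source B's section(n) = header f-string + base_content + closing
def pvSection (n : Int) : List Char :=
  (pvHeadPre.toList ++ ' ' :: (PySem.Int.toChars n ++ ':' :: ' ' :: pvMidRest.toList)) ++ pvBaseContent.toList ++ pvClosing.toList

def create_massive_test_text_alt (target_words : Int) : String :=
  let wordsPerSection : Int := ((PySem.Chars.split₀ (pvSection 1)).length : Int)
  let sectionsNeeded : Int := -(PySem.Int.floordiv (-target_words) wordsPerSection)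
  String.ofList (PySem.Chars.join [] ((PySem.List.pyRange 1 (sectionsNeeded + 1)).map pvSection))

-- ===== PRECONDITION & SPEC =====
def Spec_create_massive_test_text (target_words : Int) (out : String) : Prop := out = create_massive_test_text_alt target_words
instance (target_words : Int) (out : String) : Decidable (Spec_create_massive_test_text target_words out) := by unfold Spec_create_massive_test_text; infer_instance

-- ===== CLAIM (what is proved, stated in full; the proofs are below) =====
def Claim_equal_create_massive_test_text : Prop := ∀ (target_words : Int), Dom_create_massive_test_text target_words → Spec_create_massive_test_text target_words (create_massive_test_text target_words)

-- ===== LEMMAS AND PROOFS =====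

-- words-per-section constant and the accumulated text after j iterations
def pvW : Nat := (PySem.Chars.split₀ (pvSection 1)).length
def pvT (j : Nat) : List Char := ((List.range j).map (fun i : Nat => pvSection ((i : Int) + 1))).flatten
def pvSecTail (n : Int) : List Char :=
  "\nSection".toList ++ (' ' :: (PySem.Int.toChars n ++ ':' :: ' ' :: pvMidRest.toList)) ++ pvBaseContent.toList ++ pvClosing.toList

lemma pv_go_acc (xs : List Char) : ∀ (cur : List Char) (acc : List (List Char)),
    PySem.Chars.split₀.go xs cur acc = acc.reverse ++ PySem.Chars.split₀.go xs cur [] := by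
  induction xs with
  | nil =>
    intro cur acc
    by_cases h : cur = [] <;> simp [PySem.Chars.split₀.go, h]
  | cons c rest ih =>
    intro cur acc
    by_cases hs : PySem.Chars.isspace c = true
    · by_cases h : cur = []
      · simp only [PySem.Chars.split₀.go, hs, h, List.isEmpty_nil, ite_true]
        exact ih [] acc
      · simp only [PySem.Chars.split₀.go, hs, List.isEmpty_iff, h, ite_true, ite_false]
        rw [ih [] (cur.reverse :: acc), ih [] [cur.reverse]]
        simp
    · simp only [PySem.Chars.split₀.go, hs]
      exact ih _ _

lemma pv_go_ws {c : Char} (hc : PySem.Chars.isspace c = true) (ys : List Char) :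
    ∀ (xs cur : List Char) (acc : List (List Char)),
    PySem.Chars.split₀.go (xs ++ c :: ys) cur acc = PySem.Chars.split₀.go ys [] ((PySem.Chars.split₀.go xs cur acc).reverse) := by
  intro xs
  induction xs with
  | nil =>
    intro cur acc
    by_cases h : cur = [] <;>
      simp [PySem.Chars.split₀.go, hc, h, List.isEmpty_iff]
  | cons d rest ih =>
    intro cur acc
    by_cases hs : PySem.Chars.isspace d = true
    · by_cases h : cur = []
      · simp only [List.cons_append, PySem.Chars.split₀.go, hs, h, List.isEmpty_nil, ite_true]
        exact ih [] acc
      · simp only [List.cons_append, PySem.Chars.split₀.go, hs, List.isEmpty_iff, h, ite_true, ite_false]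
        exact ih [] (cur.reverse :: acc)
    · simp only [List.cons_append, PySem.Chars.split₀.go, hs]
      exact ih (d :: cur) acc

lemma pv_go_nonspace (w : List Char) (hw : ∀ c ∈ w, PySem.Chars.isspace c = false) :
    ∀ (ys cur : List Char) (acc : List (List Char)),
    PySem.Chars.split₀.go (w ++ ys) cur acc = PySem.Chars.split₀.go ys (w.reverse ++ cur) acc := by
  induction w with
  | nil => intro ys cur acc; simp
  | cons d rest ih =>
    intro ys cur acc
    have hd : PySem.Chars.isspace d = false := hw d (by simp)
    simp only [List.cons_append, PySem.Chars.split₀.go, hd]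
    rw [ih (fun c hcm => hw c (by simp [hcm])) ys (d :: cur) acc]
    simp

lemma pv_split_append {c : Char} (hc : PySem.Chars.isspace c = true) (xs ys : List Char) :
    PySem.Chars.split₀ (xs ++ c :: ys) = PySem.Chars.split₀ xs ++ PySem.Chars.split₀ (c :: ys) := by
  show PySem.Chars.split₀.go _ [] [] = _
  rw [pv_go_ws hc ys xs [] [], pv_go_acc]
  simp only [List.reverse_reverse]
  congr 1
  show _ = PySem.Chars.split₀.go (c :: ys) [] []
  simp [PySem.Chars.split₀.go, hc]

lemma pv_digitChar_nonspace (m : Nat) : PySem.Chars.isspace (Nat.digitChar m) = false := by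
  by_cases h : m < 16
  · interval_cases m <;> decide
  · unfold Nat.digitChar
    repeat rw [if_neg (by omega)]
    decide

lemma pv_toDigitsCore_nonspace : ∀ (fuel n : Nat) (ds : List Char),
    (∀ c ∈ ds, PySem.Chars.isspace c = false) →
    ∀ c ∈ Nat.toDigitsCore 10 fuel n ds, PySem.Chars.isspace c = false := by
  intro fuel
  induction fuel with
  | zero => intro n ds h; simpa [Nat.toDigitsCore] using h
  | succ f ih =>
    intro n ds h c hc
    rw [show Nat.toDigitsCore 10 (f+1) n ds =
        if n / 10 = 0 then (n % 10).digitChar :: ds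
        else Nat.toDigitsCore 10 f (n / 10) ((n % 10).digitChar :: ds) from by rw [Nat.toDigitsCore]] at hc
    have hds : ∀ c ∈ (n % 10).digitChar :: ds, PySem.Chars.isspace c = false := by
      intro c hcm
      rcases List.mem_cons.mp hcm with h1 | h2
      · subst h1; exact pv_digitChar_nonspace _
      · exact h c h2
    by_cases h10 : n / 10 = 0
    · rw [if_pos h10] at hc; exact hds c hc
    · rw [if_neg h10] at hc; exact ih (n / 10) _ hds c hc

lemma pv_toChars_nonspace (n : Int) (hn : 0 ≤ n) :
    ∀ c ∈ PySem.Int.toChars n, PySem.Chars.isspace c = false := by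
  intro c hc
  rw [PySem.Int.toChars, if_neg (by omega)] at hc
  exact pv_toDigitsCore_nonspace _ _ _ (by simp) c hc

lemma pv_sec_len (n : Int) (hn : 0 ≤ n) :
    (PySem.Chars.split₀ (pvSection n)).length =
      (PySem.Chars.split₀.go pvHeadPre.toList [] []).length + 1 +
      (PySem.Chars.split₀.go (pvMidRest.toList ++ pvBaseContent.toList ++ pvClosing.toList) [] []).length := by
  have step1 : ∀ (rest cur : List Char) (acc : List (List Char)),
      PySem.Chars.split₀.go (':' :: rest) cur acc = PySem.Chars.split₀.go rest (':' :: cur) acc := by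
    intro rest cur acc
    simp [PySem.Chars.split₀.go, show PySem.Chars.isspace ':' = false from by decide]
  have step2 : ∀ (rest cur : List Char) (acc : List (List Char)), cur ≠ [] →
      PySem.Chars.split₀.go (' ' :: rest) cur acc = PySem.Chars.split₀.go rest [] (cur.reverse :: acc) := by
    intro rest cur acc h
    simp [PySem.Chars.split₀.go, show PySem.Chars.isspace ' ' = true from by decide, List.isEmpty_iff, h]
  have hsec : pvSection n = pvHeadPre.toList ++ ' ' ::
      (PySem.Int.toChars n ++ ':' :: ' ' :: (pvMidRest.toList ++ pvBaseContent.toList ++ pvClosing.toList)) := by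
    simp only [pvSection, List.append_assoc, List.cons_append]
  rw [show PySem.Chars.split₀ (pvSection n) = PySem.Chars.split₀.go (pvSection n) [] [] from rfl, hsec]
  rw [pv_go_ws (by decide) _ pvHeadPre.toList [] []]
  rw [pv_go_nonspace _ (pv_toChars_nonspace n hn)]
  rw [step1, step2 _ _ _ (by simp), pv_go_acc]
  simp only [List.length_append, List.length_reverse, List.length_cons]

lemma pv_W_eq (n : Int) (hn : 0 ≤ n) : (PySem.Chars.split₀ (pvSection n)).length = pvW := by
  rw [pv_sec_len n hn]; rw [pvW, pv_sec_len 1 (by norm_num)]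

lemma pv_W_pos : 1 ≤ pvW := by
  rw [pvW, pv_sec_len 1 (by norm_num)]; omega

lemma pvSection_eq_cons (n : Int) : pvSection n = '\n' :: pvSecTail n := by
  rw [pvSection, pvSecTail, show pvHeadPre.toList = '\n' :: "\nSection".toList from rfl]
  simp only [List.append_assoc, List.cons_append]

lemma pv_split_T_append (t : List Char) (n : Int) :
    PySem.Chars.split₀ (t ++ pvSection n) = PySem.Chars.split₀ t ++ PySem.Chars.split₀ (pvSection n) := by
  rw [pvSection_eq_cons n]
  exact pv_split_append (by decide) t (pvSecTail n)

lemma pvT_succ (j : Nat) : pvT (j + 1) = pvT j ++ pvSection ((j : Int) + 1) := by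
  simp only [pvT, List.range_succ, List.map_append, List.map_cons, List.map_nil,
    List.flatten_append, List.flatten_cons, List.flatten_nil, List.append_nil]

lemma pvT_len (j : Nat) : (PySem.Chars.split₀ (pvT j)).length = j * pvW := by
  induction j with
  | zero =>
    rw [show pvT 0 = [] from rfl, show PySem.Chars.split₀ ([] : List Char) = [] from rfl]
    rw [Nat.zero_mul]
    rfl
  | succ j ih =>
    rw [pvT_succ, pv_split_T_append, List.length_append, ih,
      pv_W_eq ((j : Int) + 1) (by omega), Nat.succ_mul]

lemma pv_loop_eq (t : Int) (fuel : Nat) : ∀ (j : Nat),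
    t ≤ ((j : Int) + (fuel : Int)) * (pvW : Int) →
    pvLoopA t fuel (pvT j) ((j : Int) * (pvW : Int)) ((j : Int) + 1) =
      pvT (max j (-(PySem.Int.floordiv (-t) (pvW : Int))).toNat) := by
  have hWpos : (0 : Int) < (pvW : Int) := by exact_mod_cast pv_W_pos
  have hC := (PySem.Int.neg_floordiv_neg_eq_iff_of_pos (a := t)
    (q := -PySem.Int.floordiv (-t) (pvW : Int)) hWpos).mp rfl
  induction fuel with
  | zero =>
    intro j h
    have hCj : -PySem.Int.floordiv (-t) (pvW : Int) ≤ (j : Int) := by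
      by_contra hlt
      push_neg at hlt
      have := mul_le_mul_of_nonneg_right (by omega :
        (j : Int) ≤ -PySem.Int.floordiv (-t) (pvW : Int) - 1) (le_of_lt hWpos)
      simp only [Nat.cast_zero, add_zero] at h
      omega
    rw [show pvLoopA t 0 (pvT j) ((j : Int) * (pvW : Int)) ((j : Int) + 1) = pvT j from rfl]
    congr 1
    omega
  | succ fuel ih =>
    intro j h
    by_cases hlt : ((j : Int) * (pvW : Int)) < t
    · rw [show pvLoopA t (fuel + 1) (pvT j) ((j : Int) * (pvW : Int)) ((j : Int) + 1) =
          pvLoopA t fuel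
            (((pvT j ++ (pvHeadPre.toList ++ ' ' :: (PySem.Int.toChars ((j : Int) + 1) ++ ':' :: ' ' :: pvMidRest.toList))) ++ pvBaseContent.toList) ++ pvClosing.toList)
            ((PySem.Chars.split₀ (((pvT j ++ (pvHeadPre.toList ++ ' ' :: (PySem.Int.toChars ((j : Int) + 1) ++ ':' :: ' ' :: pvMidRest.toList))) ++ pvBaseContent.toList) ++ pvClosing.toList)).length : Int)
            (((j : Int) + 1) + 1) from by rw [pvLoopA]; rw [if_pos hlt]]
      have htext : (((pvT j ++ (pvHeadPre.toList ++ ' ' :: (PySem.Int.toChars ((j : Int) + 1) ++ ':' :: ' ' :: pvMidRest.toList))) ++ pvBaseContent.toList) ++ pvClosing.toList) = pvT (j + 1) := by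
        rw [pvT_succ, pvSection]
        simp only [List.append_assoc]
      rw [htext]
      rw [show ((PySem.Chars.split₀ (pvT (j + 1))).length : Int) = ((j + 1 : Nat) : Int) * (pvW : Int) from by rw [pvT_len (j + 1)]; push_cast; ring]
      rw [show ((j : Int) + 1) + 1 = ((j + 1 : Nat) : Int) + 1 from by push_cast; ring]
      rw [ih (j + 1) (by push_cast at h ⊢; linarith)]
      have hjC : (j : Int) < -PySem.Int.floordiv (-t) (pvW : Int) := by
        by_contra hge
        push_neg at hge
        have := mul_le_mul_of_nonneg_right hge (le_of_lt hWpos)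
        omega
      congr 1
      omega
    · rw [show pvLoopA t (fuel + 1) (pvT j) ((j : Int) * (pvW : Int)) ((j : Int) + 1) = pvT j from by rw [pvLoopA]; rw [if_neg hlt]]
      push_neg at hlt
      have hCj : -PySem.Int.floordiv (-t) (pvW : Int) ≤ (j : Int) := by
        by_contra hlt2
        push_neg at hlt2
        have := mul_le_mul_of_nonneg_right (by omega :
          (j : Int) ≤ -PySem.Int.floordiv (-t) (pvW : Int) - 1) (le_of_lt hWpos)
        omega
      congr 1
      omega

lemma pv_join_nil (l : List (List Char)) : PySem.Chars.join [] l = l.flatten := by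
  show List.intercalate [] l = l.flatten
  induction l with
  | nil => rfl
  | cons x xs ih => cases xs <;> simp_all [List.intercalate, List.intersperse]

lemma pv_pyRange_nil (a b : Int) (h : b ≤ a) : PySem.List.pyRange a b = [] := by
  simp [PySem.List.pyRange, not_lt.mpr h]

lemma pv_range_flat : ∀ (m : Nat),
    ((PySem.List.pyRange 1 ((m : Int) + 1)).map pvSection).flatten = pvT m := by
  intro m
  induction m with
  | zero =>
    rw [show ((0 : Nat) : Int) + 1 = 1 from by norm_num, pv_pyRange_nil 1 1 le_rfl]
    rfl
  | succ m ih =>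
    rw [show ((m + 1 : Nat) : Int) + 1 = ((m : Int) + 1) + 1 from by push_cast; ring]
    rw [PySem.List.pyRange_one_succ_right (by omega)]
    rw [List.map_append, List.flatten_append, ih]
    rw [pvT_succ]
    simp

lemma pv_alt_eq (t : Int) :
    create_massive_test_text_alt t =
      String.ofList (pvT (-(PySem.Int.floordiv (-t) (pvW : Int))).toNat) := by
  show String.ofList (PySem.Chars.join []
      ((PySem.List.pyRange 1 (-(PySem.Int.floordiv (-t) (pvW : Int)) + 1)).map pvSection)) = _
  congr 1
  by_cases hle : -(PySem.Int.floordiv (-t) (pvW : Int)) ≤ 0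
  · rw [pv_pyRange_nil 1 _ (by omega)]
    rw [show (-(PySem.Int.floordiv (-t) (pvW : Int))).toNat = 0 from by omega]
    rfl
  · rw [show -(PySem.Int.floordiv (-t) (pvW : Int)) =
      (((-(PySem.Int.floordiv (-t) (pvW : Int))).toNat : Nat) : Int) from by omega]
    rw [pv_join_nil, pv_range_flat]
    congr 1

lemma pv_main (t : Int) : create_massive_test_text t = create_massive_test_text_alt t := by
  rw [pv_alt_eq t]
  show String.ofList (pvLoopA t (t.toNat + 1) [] 0 1) = _
  have hW1 : (1 : Int) ≤ (pvW : Int) := by exact_mod_cast pv_W_pos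
  have hcond : t ≤ (((0 : Nat) : Int) + ((t.toNat + 1 : Nat) : Int)) * (pvW : Int) := by
    have h1 : t ≤ (t.toNat : Int) := Int.self_le_toNat t
    have h2 : ((t.toNat : Int) + 1) * 1 ≤ ((t.toNat : Int) + 1) * (pvW : Int) :=
      mul_le_mul_of_nonneg_left hW1 (by omega)
    push_cast
    nlinarith
  have h0 := pv_loop_eq t (t.toNat + 1) 0 hcond
  simp only [Nat.cast_zero, zero_mul, zero_add, Nat.zero_max] at h0
  rw [show pvT 0 = ([] : List Char) from rfl] at h0
  rw [h0]

-- ===== VERDICT (by name: the statement is the Claim_ definition above) =====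
theorem create_massive_test_text_spec : Claim_equal_create_massive_test_text := by
  intro target_words _
  unfold Spec_create_massive_test_text
  exact pv_main target_words
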